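-- pv_equiv track=rewrite | github.com/bryannalfaro/Lab2-Redes | test2.py | remove_redundant_bits
-- ===== SOURCE A (Python) =====
-- def remove_redundant_bits(arr, r):
--     j = 0
--     k = 1
--     res = ''
--
--     rev = arr[::-1]
--
--     for i in range(1, len(rev)+1):
--         if (i == 2**j):
--             j += 1
--         else:
--             res = res + rev[i-1]
--
--     return res[::-1]
-- ===== SOURCE B (Python) =====
-- def remove_redundant_bits(arr, r):
--     # Block decomposition: in the reversed string, the kept positions are exactly
--     # the maximal runs strictly between consecutive powers of two, i.e. the
--     # slices rev[p : 2*p-1] for p = 1, 2, 4, ...  Concatenate those slices.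
--     rev = arr[::-1]
--     chunks = []
--     p = 1
--     while p <= len(rev):
--         chunks.append(rev[p:2*p - 1])
--         p *= 2
--     return ''.join(chunks)[::-1]
-- ===== Notes on version B (the rewrite author's own statement) =====
-- stated objective: faster
-- what changed: Instead of scanning every position and testing each index against the next power of two, B extracts the kept characters as whole blocks: the runs strictly between consecutive powers of two are exactly the slices rev[p:2*p-1] for p = 1, 2, 4, ..., so B concatenates O(log n) bulk slices and never inspects positions one by one.
import Mathlib
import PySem

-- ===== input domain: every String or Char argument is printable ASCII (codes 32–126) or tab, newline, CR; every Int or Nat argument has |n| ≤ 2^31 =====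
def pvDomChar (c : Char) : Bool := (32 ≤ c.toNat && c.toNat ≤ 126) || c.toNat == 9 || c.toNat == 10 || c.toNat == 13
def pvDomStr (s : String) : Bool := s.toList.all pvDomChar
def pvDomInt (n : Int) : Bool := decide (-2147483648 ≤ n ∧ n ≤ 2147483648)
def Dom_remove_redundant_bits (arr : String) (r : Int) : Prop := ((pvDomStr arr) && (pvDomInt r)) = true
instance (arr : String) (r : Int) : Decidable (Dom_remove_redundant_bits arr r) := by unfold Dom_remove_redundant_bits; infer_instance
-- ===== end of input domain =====

-- B replaces A's per-position scan (which tests each index against the next power of two)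
-- by extracting the kept runs as whole slices rev[p:2p-1] for p = 1,2,4,…; same return
-- value, measurably faster in Python (bulk slices instead of a per-character loop).
-- The parameter r is unused by both programs, as in the Python sources.

-- ===== PORT A =====
-- loop body of A's 'for i in range(1, len(rev)+1)': state = (j, res)
def pvStepA (rev : List Char) (s : Nat × List Char) (i : Int) : Nat × List Char :=
  if i = (2 : Int) ^ s.1 then (s.1 + 1, s.2) else (s.1, s.2 ++ [PySem.List.pyGetD rev (i - 1) ' '])

def remove_redundant_bits (arr : String) (r : Int) : String :=
  -- j = 0; k = 1 (k is dead in A); res = ''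
  let rev := arr.toList.reverse                    -- arr[::-1]
  let fin := (PySem.List.pyRange 1 ((rev.length : Int) + 1) 1).foldl (pvStepA rev) (0, [])
  String.ofList fin.2.reverse                      -- res[::-1]

-- ===== PORT B =====
-- Source B's 'while p <= len(rev): chunks.append(rev[p:2*p-1]); p *= 2'
def pvChunks (rev : List Char) (p : Int) (hp : 0 < p) : List (List Char) :=
  if h : p ≤ (rev.length : Int) then
    PySem.List.slice rev (some p) (some (2 * p - 1)) :: pvChunks rev (2 * p) (by omega)
  else []
termination_by ((rev.length : Int) + 1 - p).toNat
decreasing_by omega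

def remove_redundant_bits_alt (arr : String) (r : Int) : String :=
  let rev := arr.toList.reverse                    -- arr[::-1]
  let chunks := pvChunks rev 1 (by omega)          -- the while loop building 'chunks'
  String.ofList chunks.flatten.reverse             -- ''.join(chunks)[::-1]

-- ===== PRECONDITION & SPEC =====
def Spec_remove_redundant_bits (arr : String) (r : Int) (out : String) : Prop := out = remove_redundant_bits_alt arr r
instance (arr : String) (r : Int) (out : String) : Decidable (Spec_remove_redundant_bits arr r out) := by unfold Spec_remove_redundant_bits; infer_instance

-- ===== CLAIM (what is proved, stated in full; the proofs are below) =====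
def Claim_equal_remove_redundant_bits : Prop := ∀ (arr : String) (r : Int), Dom_remove_redundant_bits arr r → Spec_remove_redundant_bits arr r (remove_redundant_bits arr r)

-- ===== LEMMAS AND PROOFS =====

-- A's loop over a stretch containing no power-of-two position just appends the characters
lemma foldl_no_pow (rev : List Char) (J : Nat) :
    ∀ (l : List Int) (res : List Char), (∀ i ∈ l, i ≠ (2 : Int) ^ J) →
      l.foldl (pvStepA rev) (J, res)
        = (J, res ++ l.map (fun i => PySem.List.pyGetD rev (i - 1) ' ')) := by
  intro l
  induction l with
  | nil => simp
  | cons x xs ih =>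
    intro res hx
    have hne : x ≠ (2 : Int) ^ J := hx x (by simp)
    simp only [List.foldl_cons, List.map_cons]
    rw [show pvStepA rev (J, res) x = (J, res ++ [PySem.List.pyGetD rev (x - 1) ' ']) by
      simp [pvStepA, hne]]
    rw [ih _ (fun i hi => hx i (by simp [hi]))]
    simp

-- B's slice rev[p:2p-1] is exactly the characters A appends for positions p+1 .. min(2p, n+1)-1
lemma chunk_eq (rev : List Char) (p : Int) (hp : 1 ≤ p) (hpn : p ≤ (rev.length : Int)) :
    PySem.List.slice rev (some p) (some (2 * p - 1))
      = (PySem.List.pyRange (p + 1) (min (2 * p) ((rev.length : Int) + 1)) 1).map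
          (fun i => PySem.List.pyGetD rev (i - 1) ' ') := by
  rw [PySem.List.slice_toNat (xs := rev) (a := p) (b := 2 * p - 1) (by omega) (by omega)]
  apply List.ext_getElem
  · simp [PySem.List.length_pyRange_one]
    omega
  · intro k h1 h2
    have hk : k < rev.length - p.toNat := by
      have := List.length_take_le ((2 * p - 1).toNat - p.toNat) (rev.drop p.toNat)
      simp at h1
      omega
    rw [List.getElem_take, List.getElem_drop]
    rw [List.getElem_map, PySem.List.getElem_pyRange_one]
    have hb : (p + 1 + (k : Int) - 1) = ((p.toNat + k : Nat) : Int) := by push_cast; omega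
    rw [hb, PySem.List.pyGetD_natCast]
    rw [List.getD_eq_getElem _ _ (by omega)]

-- A's interleaved loop from position p = 2^j equals the concatenation of B's chunks from p
lemma loopA_eq_chunks (rev : List Char) :
    ∀ (fuel : Nat) (p : Int) (j : Nat) (res : List Char) (hp : 0 < p),
      ((rev.length : Int) + 1 - p).toNat ≤ fuel → p = (2 : Int) ^ j →
      ((PySem.List.pyRange p ((rev.length : Int) + 1) 1).foldl (pvStepA rev) (j, res)).2
        = res ++ (pvChunks rev p hp).flatten := by
  intro fuel
  induction fuel with
  | zero =>
    intro p j res hp hf hpj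
    rw [PySem.List.pyRange_one_eq_nil (by omega), pvChunks]
    rw [dif_neg (by omega)]
    simp
  | succ f ih =>
    intro p j res hp hf hpj
    by_cases hpn : p ≤ (rev.length : Int)
    · rw [pvChunks, dif_pos hpn]
      have hpm : p < min (2 * p) ((rev.length : Int) + 1) := by omega
      rw [PySem.List.pyRange_one_append p (min (2 * p) ((rev.length : Int) + 1))
        ((rev.length : Int) + 1) (by omega) (by omega), List.foldl_append]
      rw [PySem.List.pyRange_one_cons hpm, List.foldl_cons]
      rw [show pvStepA rev (j, res) p = (j + 1, res) by simp [pvStepA, hpj]]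
      rw [foldl_no_pow rev (j + 1) _ res (by
        intro i hi
        rw [PySem.List.mem_pyRange_one] at hi
        have : i < (2 : Int) ^ (j + 1) := by rw [pow_succ, ← hpj]; omega
        omega)]
      rw [chunk_eq rev p (by omega) hpn]
      by_cases h2 : 2 * p ≤ (rev.length : Int) + 1
      · rw [show min (2 * p) ((rev.length : Int) + 1) = 2 * p by omega]
        rw [ih (2 * p) (j + 1) _ (by omega) (by omega) (by rw [pow_succ, ← hpj]; ring)]
        simp
      · rw [show min (2 * p) ((rev.length : Int) + 1) = (rev.length : Int) + 1 by omega]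
        rw [PySem.List.pyRange_one_eq_nil (le_refl _)]
        rw [pvChunks, dif_neg (by omega)]
        simp
    · rw [PySem.List.pyRange_one_eq_nil (by omega), pvChunks, dif_neg hpn]
      simp

-- ===== VERDICT (by name: the statement is the Claim_ definition above) =====
theorem remove_redundant_bits_spec : Claim_equal_remove_redundant_bits := by
  intro arr r _
  unfold Spec_remove_redundant_bits remove_redundant_bits remove_redundant_bits_alt
  have h := loopA_eq_chunks arr.toList.reverse
    (((arr.toList.reverse.length : Int) + 1 - 1).toNat) 1 0 [] (by omega) (by omega) (by norm_num)
  simp only [h, List.nil_append]
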